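-- pv_equiv track=rewrite | github.com/reecedoyle/advent-of-code | 2024/05/05.py | backwards_dict
-- ===== SOURCE A (Python) =====
-- from typing import List, Set, Tuple
--
-- def backwards_dict(rules: List[Tuple[int, int]]) -> dict[int, set[int]]:
--     rule_dict = {}
--     for first, second in rules:
--         if second in rule_dict:
--             rule_dict[second] |= {first}
--         else:
--             rule_dict[second] = {first}
--     return rule_dict
-- ===== SOURCE B (Python) =====
-- def backwards_dict(rules):
--     # Two-pass grouping: distinct 'second' keys in first-appearance order,
--     # then one set comprehension per key collecting matching 'first's.
--     keys = dict.fromkeys(second for _, second in rules)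
--     return {k: {first for first, second in rules if second == k} for k in keys}
-- ===== Notes on version B (the rewrite author's own statement) =====
-- stated objective: alternative
-- what changed: Replaces the incremental dict-of-sets accumulation (conditional insert-or-union per pair) with a two-pass grouping: dedupe the 'second' keys once, then build each group's set by one comprehension over the rules.
import Mathlib
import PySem

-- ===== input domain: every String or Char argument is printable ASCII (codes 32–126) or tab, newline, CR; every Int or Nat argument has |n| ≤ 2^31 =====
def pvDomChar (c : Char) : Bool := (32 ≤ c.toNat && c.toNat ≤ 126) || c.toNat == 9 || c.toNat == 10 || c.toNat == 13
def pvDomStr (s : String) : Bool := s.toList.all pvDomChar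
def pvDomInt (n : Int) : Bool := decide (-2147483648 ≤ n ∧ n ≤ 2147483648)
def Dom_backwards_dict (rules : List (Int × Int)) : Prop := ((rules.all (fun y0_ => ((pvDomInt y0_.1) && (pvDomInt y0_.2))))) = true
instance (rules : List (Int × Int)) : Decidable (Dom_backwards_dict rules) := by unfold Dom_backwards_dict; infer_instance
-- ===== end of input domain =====

-- B replaces A's incremental dict-of-sets accumulation with a two-pass grouping
-- (dedupe the keys, then one filtered pass per key); alternative decomposition, not claimed faster.


-- ===== PORT A =====
-- rule_dict = {}; for first, second in rules: if second in rule_dict: rule_dict[second] |= {first}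
-- else: rule_dict[second] = {first}; return rule_dict
def backwards_dict (rules : List (Int × Int)) : List (Int × List Int) :=
  (rules.foldl (fun rule_dict p =>
      if rule_dict.contains p.2 then
        rule_dict.insert p.2 (PySem.Set.union (rule_dict.getD p.2 []) (PySem.Set.ofList [p.1]))
      else
        rule_dict.insert p.2 (PySem.Set.ofList [p.1]))
    (PySem.Dict.empty : PySem.Dict Int (List Int))).items

-- ===== PORT B =====
-- keys = dict.fromkeys(second for _, second in rules)
-- return {k: {first for first, second in rules if second == k} for k in keys}
def backwards_dict_alt (rules : List (Int × Int)) : List (Int × List Int) :=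
  (PySem.List.dedup (rules.map (fun p => p.2))).map
    (fun k => (k, PySem.Set.ofList ((rules.filter (fun p => p.2 == k)).map (fun p => p.1))))

-- ===== PRECONDITION & SPEC =====
def Spec_backwards_dict (rules : List (Int × Int)) (out : List (Int × List Int)) : Prop := out = backwards_dict_alt rules
instance (rules : List (Int × Int)) (out : List (Int × List Int)) : Decidable (Spec_backwards_dict rules out) := by unfold Spec_backwards_dict; infer_instance

-- ===== CLAIM (what is proved, stated in full; the proofs are below) =====
def Claim_equal_backwards_dict : Prop := ∀ (rules : List (Int × Int)), Dom_backwards_dict rules → Spec_backwards_dict rules (backwards_dict rules)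

-- ===== LEMMAS AND PROOFS =====

-- A's loop body, in both branches, inserts Set.add of the current value (default []).
lemma step_eq (d : PySem.Dict Int (List Int)) (p : Int × Int) :
    (if d.contains p.2 then
        d.insert p.2 (PySem.Set.union (d.getD p.2 []) (PySem.Set.ofList [p.1]))
      else
        d.insert p.2 (PySem.Set.ofList [p.1]))
    = d.insert p.2 (PySem.Set.add (d.getD p.2 []) p.1) := by
  by_cases h : d.contains p.2
  · simp only [h, if_true]; rfl
  · simp only [Bool.not_eq_true] at h
    simp only [h, PySem.Dict.getD_of_not_contains d [] h]
    rfl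

-- value of A's dict at any key k after the loop
lemma getD_loop (l : List (Int × Int)) (d : PySem.Dict Int (List Int)) (k : Int) :
    (l.foldl (fun d p => d.insert p.2 (PySem.Set.add (d.getD p.2 []) p.1)) d).getD k []
      = PySem.Set.update (d.getD k []) ((l.filter (fun p => p.2 == k)).map (fun p => p.1)) := by
  induction l generalizing d with
  | nil => simp [PySem.Set.update]
  | cons p l ih =>
    simp only [List.foldl_cons, List.filter_cons, ih]
    by_cases hk : p.2 = k
    · subst hk
      simp [PySem.Dict.getD_insert_self, PySem.Set.update_cons]
    · have : (p.2 == k) = false := by simp [hk]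
      simp [this, PySem.Dict.getD_insert_of_ne _ _ _ (Ne.symm hk)]

-- ===== VERDICT (by name: the statement is the Claim_ definition above) =====
theorem backwards_dict_spec : Claim_equal_backwards_dict := by
  intro rules _
  unfold Spec_backwards_dict backwards_dict backwards_dict_alt
  have hstep : (fun (rule_dict : PySem.Dict Int (List Int)) (p : Int × Int) =>
      if rule_dict.contains p.2 then
        rule_dict.insert p.2 (PySem.Set.union (rule_dict.getD p.2 []) (PySem.Set.ofList [p.1]))
      else
        rule_dict.insert p.2 (PySem.Set.ofList [p.1]))
      = (fun d p => d.insert p.2 (PySem.Set.add (d.getD p.2 []) p.1)) := by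
    funext d p; exact step_eq d p
  rw [hstep]
  have hnd : (rules.foldl (fun d p => d.insert p.2 (PySem.Set.add (d.getD p.2 []) p.1))
      (PySem.Dict.empty : PySem.Dict Int (List Int))).keys.Nodup :=
    PySem.Dict.nodup_keys_foldl_insert_key rules (fun p => p.2) _ _ PySem.Dict.nodup_keys_empty
  rw [PySem.Dict.items_eq_map_keys _ hnd []]
  have hkeys : (rules.foldl (fun d p => d.insert p.2 (PySem.Set.add (d.getD p.2 []) p.1))
      (PySem.Dict.empty : PySem.Dict Int (List Int))).keys
      = PySem.List.dedup (rules.map (fun p => p.2)) := by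
    rw [PySem.Dict.keys_foldl_insert_key rules (fun p => p.2)]
    show PySem.Set.update [] _ = _
    rw [PySem.Set.update_nil_left, PySem.List.dedup_eq_ofList]
  rw [hkeys]
  refine List.map_congr_left (fun k _ => ?_)
  rw [getD_loop]
  show (k, PySem.Set.update [] _) = _
  rw [PySem.Set.update_nil_left]
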